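-- pv_equiv track=rewrite | github.com/taozhewang/first_study | game/co/ui.py | get_distinct_group_count
-- ===== SOURCE A (Python) =====
-- def get_distinct_group_count(best_solution, l_size, m_size):
--     group_count = 0
--     _l=l_size
--     _group=[]
--     counters=[]
--     L_values = list(set(best_solution))
--     for p in best_solution:
--         _group.append(p)
--         while _l<p:
--             _l+=l_size
--         _l -= p
--
--         if _l<m_size:
--             # 统计计数
--             _counter=[0 for _ in range(len(L_values))]
--             for x in _group:
--                 _counter[L_values.index(x)]+=1
--
--             if _counter not in counters:
--                 group_count+=1
--             else:
--                 counters.append(_counter)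
--
--             _l=l_size
--
--     if len(_group)>0:
--         _counter=[0 for _ in range(len(L_values))]
--         for x in _group:
--             _counter[L_values.index(x)]+=1
--         if _counter not in counters:
--             group_count+=1
--
--     return group_count
-- ===== SOURCE B (Python) =====
-- def get_distinct_group_count(best_solution, l_size, m_size):
--     # One arithmetic pass: the while-loop is replaced by a modular step, and the
--     # dead counter machinery of A (its `counters` list can never grow) is dropped.
--     count = 0
--     rem = l_size
--     for p in best_solution:
--         rem = rem - p if rem >= p else (rem - p) % l_size
--         if rem < m_size:
--             count += 1
--             rem = l_size
--     return count + (1 if best_solution else 0)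
-- ===== Notes on version B (the rewrite author's own statement) =====
-- stated objective: faster
-- what changed: A's counter/membership machinery is dead code (its `counters` list can never grow, so every boundary event counts); B drops it and replaces the inner while-loop by one Python modulo step, giving a single O(n) arithmetic pass.
-- outside the precondition, e.g. on get_distinct_group_count([3, 1], 0, 1): A does not finish within the time limit, B raises ZeroDivisionError; on get_distinct_group_count([-2], -1, 5): A returns 2, B returns 2
import Mathlib
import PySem

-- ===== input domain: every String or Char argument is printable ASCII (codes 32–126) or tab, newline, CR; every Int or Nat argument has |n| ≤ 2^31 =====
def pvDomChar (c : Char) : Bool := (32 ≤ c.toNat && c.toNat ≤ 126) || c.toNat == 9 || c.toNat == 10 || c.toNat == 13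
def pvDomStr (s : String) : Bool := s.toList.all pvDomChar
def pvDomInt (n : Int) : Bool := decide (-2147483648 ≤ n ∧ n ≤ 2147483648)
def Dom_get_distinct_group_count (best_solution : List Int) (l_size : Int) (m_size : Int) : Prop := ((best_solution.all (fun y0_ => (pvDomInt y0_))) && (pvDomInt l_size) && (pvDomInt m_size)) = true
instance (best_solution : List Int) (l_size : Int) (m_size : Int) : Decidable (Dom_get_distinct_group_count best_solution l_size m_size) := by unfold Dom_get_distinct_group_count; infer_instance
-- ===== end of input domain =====

-- B drops A's dead counter machinery (A's `counters` list can never grow) and replaces the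
-- inner while-loop by one modular step: a single O(n) pass; proved equal to A for l_size > 0.


-- ===== PORT A =====
-- while _l < p: _l += l_size   (the '0 < l_size' guard only makes the loop total; under
-- Pre_ it always holds, and for l_size ≤ 0 the Python loop diverges on such inputs)
def pvBump (l_size p l : Int) : Int :=
  if _h : 0 < l_size ∧ l < p then pvBump l_size p (l + l_size) else l
termination_by (p - l).toNat
decreasing_by omega

-- _counter=[0]*len(L_values); for x in _group: _counter[L_values.index(x)] += 1
-- (the 'none' branch is unreachable under A's use: every element of _group is in L_values)
def pvCounter (Lv group : List Int) : List Int :=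
  group.foldl (fun c x =>
    match PySem.List.index? Lv x with
    | some i => c.set i (c.getD i 0 + 1)
    | none => c) (List.replicate Lv.length 0)

-- loop body of A; state = (group_count, _l, _group, counters)
def pvStepA (l_size m_size : Int) (Lv : List Int)
    (st : Int × Int × List Int × List (List Int)) (p : Int) :
    Int × Int × List Int × List (List Int) :=
  let grp := st.2.2.1 ++ [p]
  let l := pvBump l_size p st.2.1 - p
  if l < m_size then
    let c := pvCounter Lv grp
    if ¬ st.2.2.2.contains c then (st.1 + 1, l_size, grp, st.2.2.2)
    else (st.1, l_size, grp, st.2.2.2 ++ [c])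
  else (st.1, l, grp, st.2.2.2)

def get_distinct_group_count (best_solution : List Int) (l_size : Int) (m_size : Int) : Int :=
  let L_values := PySem.Set.ofList best_solution
  let st := best_solution.foldl (pvStepA l_size m_size L_values)
    (0, l_size, ([] : List Int), ([] : List (List Int)))
  if st.2.2.1.length > 0 then
    let c := pvCounter L_values st.2.2.1
    if ¬ st.2.2.2.contains c then st.1 + 1 else st.1
  else st.1

-- ===== PORT B =====
-- loop body of B; state = (count, rem)
def pvStepB (l_size m_size : Int) (st : Int × Int) (p : Int) : Int × Int :=
  let rem := if st.2 ≥ p then st.2 - p else PySem.Int.mod (st.2 - p) l_size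
  if rem < m_size then (st.1 + 1, l_size) else (st.1, rem)

def get_distinct_group_count_alt (best_solution : List Int) (l_size : Int) (m_size : Int) : Int :=
  let st := best_solution.foldl (pvStepB l_size m_size) (0, l_size)
  st.1 + (if best_solution = [] then 0 else 1)

-- ===== PRECONDITION & SPEC =====
-- Pre_ excludes l_size ≤ 0: there A's inner while-loop diverges whenever an element exceeds
-- the running remainder (and B's modulo step would raise on l_size = 0); on the few such
-- inputs where A still returns, nothing is claimed.
def Pre_get_distinct_group_count (best_solution : List Int) (l_size : Int) (m_size : Int) : Prop :=
  0 < l_size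
instance (best_solution : List Int) (l_size : Int) (m_size : Int) : Decidable (Pre_get_distinct_group_count best_solution l_size m_size) := by unfold Pre_get_distinct_group_count; infer_instance

def pvWitness_get_distinct_group_count : List Int × Int × Int := ([2, 5, 3], 3, 1)

def Spec_get_distinct_group_count (best_solution : List Int) (l_size : Int) (m_size : Int) (out : Int) : Prop := out = get_distinct_group_count_alt best_solution l_size m_size
instance (best_solution : List Int) (l_size : Int) (m_size : Int) (out : Int) : Decidable (Spec_get_distinct_group_count best_solution l_size m_size out) := by unfold Spec_get_distinct_group_count; infer_instance

-- ===== CLAIM (what is proved, stated in full; the proofs are below) =====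
def Claim_equal_get_distinct_group_count : Prop := ∀ (best_solution : List Int) (l_size : Int) (m_size : Int), Dom_get_distinct_group_count best_solution l_size m_size → Pre_get_distinct_group_count best_solution l_size m_size → Spec_get_distinct_group_count best_solution l_size m_size (get_distinct_group_count best_solution l_size m_size)

-- ===== LEMMAS AND PROOFS =====

-- the while-loop followed by '_l -= p' equals B's single arithmetic step
lemma pvBump_sub (L p l : Int) (hL : 0 < L) :
    pvBump L p l - p = if l ≥ p then l - p else PySem.Int.mod (l - p) L := by
  fun_induction pvBump L p l with
  | case1 l h ih =>
      rw [if_neg (by omega), PySem.Int.mod_eq_emod_of_pos hL]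
      rw [PySem.Int.mod_eq_emod_of_pos hL] at ih
      have hsh : (l - p) % L = (l + L - p) % L := by
        rw [show l + L - p = (l - p) + L * 1 by ring, Int.add_mul_emod_self_left]
      rw [ih]
      split_ifs with h2
      · rw [hsh, Int.emod_eq_of_lt (by omega) (by omega)]
      · rw [hsh]
  | case2 l h =>
      rw [if_pos (by omega)]

-- with empty `counters` the two loop bodies agree (and `counters` stays empty)
lemma step_eq (L m : Int) (hL : 0 < L) (Lv : List Int)
    (gc l : Int) (grp : List Int) (p : Int) :
    pvStepA L m Lv (gc, l, grp, []) p
      = ((pvStepB L m (gc, l) p).1, (pvStepB L m (gc, l) p).2, grp ++ [p], []) := by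
  simp only [pvStepA, pvStepB, pvBump_sub L p l hL, List.contains_nil, Bool.false_eq_true,
    not_false_iff, if_true]
  split_ifs <;> rfl

lemma loop_eq (L m : Int) (hL : 0 < L) (Lv : List Int) (bs : List Int) :
    ∀ (gc l : Int) (grp : List Int),
      bs.foldl (pvStepA L m Lv) (gc, l, grp, ([] : List (List Int)))
        = ((bs.foldl (pvStepB L m) (gc, l)).1,
           (bs.foldl (pvStepB L m) (gc, l)).2, grp ++ bs, []) := by
  induction bs with
  | nil => intro gc l grp; simp
  | cons p bs ih =>
      intro gc l grp
      rw [List.foldl_cons, List.foldl_cons, step_eq L m hL Lv gc l grp p, ih]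
      simp

-- ===== VERDICT (by name: the statement is the Claim_ definition above) =====
theorem get_distinct_group_count_spec : Claim_equal_get_distinct_group_count := by
  intro bs L m _ hPre
  have key := loop_eq L m hPre (PySem.Set.ofList bs) bs 0 L []
  simp only [Spec_get_distinct_group_count, get_distinct_group_count,
    get_distinct_group_count_alt, key]
  cases bs with
  | nil => simp
  | cons p t =>
      simp only [List.nil_append, List.length_cons, List.contains_nil, Bool.false_eq_true,
        not_false_iff, if_true]
      split_ifs <;> simp <;> omega
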